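-- pv_equiv track=rewrite | github.com/redfries/personalized-reading-experience | app.py | summarize_sections
-- ===== SOURCE A (Python) =====
-- def summarize_sections(sentence_records):
--     counts = {}
--     for record in sentence_records:
--         section = record.get("section", "Unknown")
--         counts[section] = counts.get(section, 0) + 1
--     if not counts:
--         return "None"
--     return ", ".join(f"{name} ({count})" for name, count in sorted(counts.items()))
-- ===== SOURCE B (Python) =====
-- def summarize_sections(sentence_records):
--     sections = sorted(r.get("section", "Unknown") for r in sentence_records)
--     if not sections:
--         return "None"
--     parts = []
--     i = 0
--     n = len(sections)
--     while i < n: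
--         j = i + 1
--         while j < n and sections[j] == sections[i]:
--             j += 1
--         parts.append(f"{sections[i]} ({j - i})")
--         i = j
--     return ", ".join(parts)
-- ===== Notes on version B (the rewrite author's own statement) =====
-- stated objective: alternative
-- what changed: Replaces the count-into-dict-then-sort-keys pass with sort-the-extracted-sections-first and a single run-length scan over adjacent equal runs.
import Mathlib
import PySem

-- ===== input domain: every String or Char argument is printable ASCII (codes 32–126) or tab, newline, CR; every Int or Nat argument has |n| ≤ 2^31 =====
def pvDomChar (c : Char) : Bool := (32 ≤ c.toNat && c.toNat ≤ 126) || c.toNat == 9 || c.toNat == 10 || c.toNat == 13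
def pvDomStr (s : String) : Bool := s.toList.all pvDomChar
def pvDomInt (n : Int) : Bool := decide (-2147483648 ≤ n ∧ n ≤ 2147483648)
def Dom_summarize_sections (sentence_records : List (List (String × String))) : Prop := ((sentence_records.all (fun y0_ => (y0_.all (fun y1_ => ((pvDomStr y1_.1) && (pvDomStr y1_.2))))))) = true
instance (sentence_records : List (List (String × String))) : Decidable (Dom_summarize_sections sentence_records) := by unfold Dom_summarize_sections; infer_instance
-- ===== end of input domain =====

-- B replaces A's count-into-dict-then-sort-keys pass by sort-the-sections-first and one
-- run-length scan over adjacent equal runs (alternative decomposition, same cost).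

-- record.get("section", "Unknown"): first-match lookup in the association list
def pvSectionOf (record : List (String × String)) : String :=
  (PySem.Dict.mk record).getD "section" "Unknown"

-- f"{name} ({count})"
def pvFmt (name : String) (count : Int) : String :=
  name ++ " (" ++ PySem.Int.toStr count ++ ")"

-- ===== PORT A =====
def summarize_sections (sentence_records : List (List (String × String))) : String :=
  let counts := sentence_records.foldl
    (fun d record =>
      let sec := pvSectionOf record
      d.insert sec (d.getD sec 0 + 1))
    (PySem.Dict.empty : PySem.Dict String Int)
  if counts.items.isEmpty then "None"
  else PySem.Str.join ", "
    ((PySem.List.sorted2 counts.items Prod.fst Prod.snd).map (fun p => pvFmt p.1 p.2))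

-- ===== PORT B =====
-- the run-length pass of Source B: each step consumes one maximal run of equal adjacent elements
def pvRleParts : List String → List String
  | [] => []
  | x :: rest =>
      pvFmt x ((rest.takeWhile (fun y => y == x)).length + 1)
        :: pvRleParts (rest.dropWhile (fun y => y == x))
termination_by s => s.length
decreasing_by
  exact Nat.lt_succ_of_le (List.length_dropWhile_le _ _)

def summarize_sections_alt (sentence_records : List (List (String × String))) : String :=
  let sections := PySem.List.sorted (sentence_records.map pvSectionOf) (fun x => x) false
  if sections.isEmpty then "None"
  else PySem.Str.join ", " (pvRleParts sections)

-- ===== PRECONDITION & SPEC =====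
def Spec_summarize_sections (sentence_records : List (List (String × String))) (out : String) : Prop := out = summarize_sections_alt sentence_records
instance (sentence_records : List (List (String × String))) (out : String) : Decidable (Spec_summarize_sections sentence_records out) := by unfold Spec_summarize_sections; infer_instance

-- ===== CLAIM (what is proved, stated in full; the proofs are below) =====
def Claim_equal_summarize_sections : Prop := ∀ (sentence_records : List (List (String × String))), Dom_summarize_sections sentence_records → Spec_summarize_sections sentence_records (summarize_sections sentence_records)

-- ===== LEMMAS AND PROOFS =====

-- insertBy only compares x with members of the accumulator
theorem pv_insertBy_congr {α : Type} (b b' : α → α → Bool) (x : α) (acc : List α)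
    (h : ∀ y ∈ acc, b x y = b' x y) :
    PySem.List.insertBy b x acc = PySem.List.insertBy b' x acc := by
  induction acc with
  | nil => rfl
  | cons y ys ih =>
      have hy : b x y = b' x y := h y (by simp)
      simp only [PySem.List.insertBy, hy]
      split
      · rfl
      · rw [ih (fun z hz => h z (by simp [hz]))]

theorem pv_foldl_insertBy_congr {α : Type} (b b' : α → α → Bool) :
    ∀ (xs acc : List α),
    (∀ x ∈ xs, ∀ y ∈ acc, b x y = b' x y) →
    xs.Pairwise (fun e l => b l e = b' l e) →
    xs.foldl (fun a x => PySem.List.insertBy b x a) acc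
      = xs.foldl (fun a x => PySem.List.insertBy b' x a) acc
  | [], acc, _, _ => rfl
  | x :: xs, acc, hacc, hpw => by
      simp only [List.foldl_cons]
      rw [pv_insertBy_congr b b' x acc (hacc x (by simp))]
      exact pv_foldl_insertBy_congr b b' xs (PySem.List.insertBy b' x acc)
        (fun z hz y hy => by
          rcases (PySem.List.mem_insertBy _ _ _ _).1 hy with rfl | hy
          · exact (List.pairwise_cons.1 hpw).1 z hz
          · exact hacc z (by simp [hz]) y hy)
        (List.pairwise_cons.1 hpw).2

-- sorted2 with keys (fst, snd) is sorted with key fst when first components are pairwise distinct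
theorem pv_sorted2_eq_sorted {α : Type} (xs : List (α × Int)) [LinearOrder α]
    (h : xs.Pairwise (fun p q => p.1 ≠ q.1)) :
    PySem.List.sorted2 xs Prod.fst Prod.snd false = PySem.List.sorted xs Prod.fst false := by
  have agree : ∀ (p q : α × Int), p.1 ≠ q.1 →
      (decide (p.1 < q.1) || (!decide (q.1 < p.1) && decide (p.2 < q.2)))
        = decide (p.1 < q.1) := by
    intro p q hne
    by_cases hlt : p.1 < q.1
    · simp [hlt]
    · have : q.1 < p.1 := lt_of_le_of_ne (le_of_not_gt hlt) (Ne.symm hne)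
      simp [hlt, this]
  show List.foldl _ [] xs = List.foldl _ [] xs
  exact pv_foldl_insertBy_congr _ _ xs []
    (by intro x hx y hy; simp at hy)
    (by
      refine h.imp_of_mem ?_
      intro p q hp hq hne
      exact agree q p (Ne.symm hne))

-- run-length pass on a non-decreasing list produces one part per distinct key, in order
theorem pv_rle_eq : ∀ (s : List String), s.Pairwise (· ≤ ·) →
    pvRleParts s
      = (PySem.List.sorted (PySem.Set.ofList s) (fun x => x) false).map
          (fun k => pvFmt k ((List.count k s : Int)))
  | [], _ => by rw [pvRleParts]; rfl
  | x :: rest, hs => by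
    have htd : rest.takeWhile (fun y => y == x) ++ rest.dropWhile (fun y => y == x) = rest :=
      List.takeWhile_append_dropWhile
    set t := rest.takeWhile (fun y => y == x) with ht
    set d := rest.dropWhile (fun y => y == x) with hd
    have hxt : ∀ y ∈ t, y = x := by
      intro y hy
      rw [ht] at hy
      have h1 := List.mem_takeWhile_imp hy
      exact eq_of_beq (by simpa using h1)
    have hrest : rest.Pairwise (· ≤ ·) := (List.pairwise_cons.1 hs).2
    have hxle : ∀ y ∈ rest, x ≤ y := (List.pairwise_cons.1 hs).1
    have hdsub : d.Sublist rest := by rw [hd]; exact List.dropWhile_sublist _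
    have hdpw : d.Pairwise (· ≤ ·) := hrest.sublist hdsub
    have hxd : ∀ y ∈ d, x < y := by
      cases hde : d with
      | nil => simp
      | cons h tl =>
        have h2 := List.head?_dropWhile_not (fun y => y == x) rest
        rw [← hd, hde] at h2
        have hh : (h == x) = false := by simpa using h2
        have hhd : h ∈ d := by rw [hde]; simp
        have hxh : x < h := lt_of_le_of_ne (hxle h (hdsub.mem hhd))
          (fun e => by simp [← e] at hh)
        have htlpw := hdpw
        rw [hde] at htlpw
        intro y hy
        rcases List.mem_cons.1 hy with rfl | hy
        · exact hxh
        · exact lt_of_lt_of_le hxh ((List.pairwise_cons.1 htlpw).1 y hy)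
    have hxnd : x ∉ d := fun h => lt_irrefl x (hxd x h)
    -- counts
    have hct : List.count x t = t.length := List.count_eq_length.2 (fun b hb => (hxt b hb).symm)
    have hcx : List.count x (x :: rest) = t.length + 1 := by
      rw [← htd]
      simp [List.count_append, hct, List.count_eq_zero.2 hxnd]
    have hck : ∀ k ∈ d, List.count k (x :: rest) = List.count k d := by
      intro k hk
      have hkx : k ≠ x := fun e => lt_irrefl x (by simpa [e] using hxd k hk)
      have hkt : List.count k t = 0 := List.count_eq_zero.2
        (fun h => hkx (hxt k h))
      rw [← htd]
      simp [List.count_append, hkt, Ne.symm hkx]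
    -- the sorted distinct keys of x :: rest
    have hsd : PySem.List.sorted (PySem.Set.ofList (x :: rest)) (fun x => x) false
        = x :: PySem.List.sorted (PySem.Set.ofList d) (fun x => x) false := by
      apply PySem.List.sorted_eq_of_perm_of_pairwise_lt
      · rw [List.perm_ext_iff_of_nodup]
        · intro a
          constructor
          · intro ha
            rcases List.mem_cons.1 ha with h | h
            · simp [PySem.Set.mem_ofList, h]
            · have had : a ∈ d := by
                simpa [PySem.List.mem_sorted, PySem.Set.mem_ofList] using h
              have har : a ∈ rest := hdsub.mem had
              simp [PySem.Set.mem_ofList, har]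
          · intro ha
            have hax : a ∈ x :: rest := by simpa [PySem.Set.mem_ofList] using ha
            rcases List.mem_cons.1 hax with h | h
            · simp [h]
            · rw [← htd] at h
              rcases List.mem_append.1 h with h | h
              · simp [hxt a h]
              · simp [PySem.List.mem_sorted, PySem.Set.mem_ofList, h]
        · exact List.nodup_cons.2 ⟨fun h => hxnd (by
            simpa [PySem.List.mem_sorted, PySem.Set.mem_ofList] using h),
            ((PySem.List.sorted_perm (PySem.Set.ofList d) (fun x => x) false).nodup_iff).2
              (PySem.Set.nodup_ofList d)⟩
        · exact PySem.Set.nodup_ofList _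
      · exact List.pairwise_cons.2 ⟨fun y hy => hxd y (by
          simpa [PySem.List.mem_sorted, PySem.Set.mem_ofList] using hy),
          PySem.List.sorted_ofList_pairwise_lt d⟩
    have hih := pv_rle_eq d hdpw
    rw [pvRleParts, ← ht, ← hd, hsd, List.map_cons, hih]
    congr 1
    · rw [hcx]; push_cast; ring_nf
    · apply List.map_congr_left
      intro k hk
      rw [hck k (by simpa [PySem.List.mem_sorted, PySem.Set.mem_ofList] using hk)]
termination_by s => s.length
decreasing_by
  exact Nat.lt_succ_of_le (List.length_dropWhile_le _ _)

-- A's sorted items equal the canonical key-sorted count pairs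
theorem pv_a_items (secs : List String) :
    PySem.List.sorted2 (PySem.Dict.counter secs).items Prod.fst Prod.snd false
      = (PySem.List.sorted (PySem.Set.ofList secs) (fun x => x) false).map
          (fun k => (k, (List.count k secs : Int))) := by
  have hnd : (PySem.Dict.counter secs).items.Pairwise (fun p q => p.1 ≠ q.1) := by
    have h := PySem.Dict.nodup_keys_counter secs
    simp only [PySem.Dict.keys] at h
    rw [List.nodup_iff_pairwise_ne, List.pairwise_map] at h
    exact h
  rw [pv_sorted2_eq_sorted _ hnd]
  apply PySem.List.sorted_eq_of_perm_of_pairwise_lt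
  · rw [PySem.Dict.items_counter]
    exact (PySem.List.sorted_perm (PySem.Set.ofList secs) (fun x => x) false).map _
  · rw [List.pairwise_map]
    exact PySem.List.sorted_ofList_pairwise_lt secs

-- the two "no records" tests agree: Counter(secs) has no items iff secs sorts to []
theorem pv_ofList_sorted_eq (secs : List String) :
    PySem.List.sorted (PySem.Set.ofList (PySem.List.sorted secs (fun x => x) false)) (fun x => x) false
      = PySem.List.sorted (PySem.Set.ofList secs) (fun x => x) false := by
  apply PySem.List.sorted_eq_sorted_of_perm _ _ _ (fun a b h => h)
  rw [List.perm_ext_iff_of_nodup (PySem.Set.nodup_ofList _) (PySem.Set.nodup_ofList _)]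
  intro a
  simp [PySem.Set.mem_ofList, PySem.List.mem_sorted]

-- ===== VERDICT (by name: the statement is the Claim_ definition above) =====
theorem summarize_sections_spec : Claim_equal_summarize_sections := by
  intro recs _
  unfold Spec_summarize_sections
  simp only [summarize_sections, summarize_sections_alt]
  have hcnt : recs.foldl
      (fun d record => d.insert (pvSectionOf record)
        (d.getD (pvSectionOf record) 0 + 1))
      (PySem.Dict.empty : PySem.Dict String Int)
      = PySem.Dict.counter (recs.map pvSectionOf) := by
    rw [← PySem.Dict.foldl_insert_getD_add_one_eq_counter, List.foldl_map]
  rw [hcnt]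
  set secs := recs.map pvSectionOf with hsecs
  by_cases hnil : secs = []
  · simp [hnil, PySem.Dict.items_counter, PySem.Set.ofList, PySem.List.sorted]
  · have hitems : (PySem.Dict.counter secs).items.isEmpty = false := by
      rw [PySem.Dict.items_counter]
      rcases secs with _ | ⟨h, tl⟩
      · exact absurd rfl hnil
      · have : h ∈ PySem.Set.ofList (h :: tl) := (PySem.Set.mem_ofList _ _).2 (by simp)
        rcases e : PySem.Set.ofList (h :: tl) with _ | _
        · rw [e] at this; simp at this
        · simp
    have hsrt : (PySem.List.sorted secs (fun x => x) false).isEmpty = false := by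
      rcases e : PySem.List.sorted secs (fun x => x) false with _ | _
      · exact absurd ((PySem.List.sorted_eq_nil_iff _ _ _).1 e) hnil
      · simp
    rw [hitems, hsrt]
    simp only [Bool.false_eq_true, if_false]
    congr 1
    rw [pv_a_items secs, List.map_map,
      pv_rle_eq _ (PySem.List.sorted_pairwise secs (fun x => x)),
      pv_ofList_sorted_eq]
    apply List.map_congr_left
    intro k _
    rw [(PySem.List.sorted_perm secs (fun x => x) false).count_eq]
    rfl
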